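-- pv_equiv track=rewrite | github.com/Mengyang2024/RL4IL | utils.py | split_SMILES
-- ===== SOURCE A (Python) =====
-- def split_SMILES(smi: str) -> list:
--     """
--     Spit the input SMILES string into individual symbols.
--
--     :param smi: a SMILES string
--     :return: a list of splitted symbols
--     """
--     symbols = []
--     current_group = ""
--
--     for char in smi:
--         if char == "[":
--             if current_group:
--                 symbols.append(current_group)
--                 current_group = ""
--             current_group += char
--         elif char == "]":
--             current_group += char
--             symbols.append(current_group)
--             current_group = ""
--         else:
--             if current_group:
--                 current_group += char
--             else:
--                 symbols.append(char)
--
--     if current_group: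
--         symbols.append(current_group)
--     symbols.insert(0, '^')
--     symbols.append('$')
--     return symbols
-- ===== SOURCE B (Python) =====
-- def split_SMILES(smi: str) -> list:
--     tokens = []
--     i = 0
--     n = len(smi)
--     while i < n:
--         if smi[i] == '[':
--             j = i + 1
--             while j < n and smi[j] != '[' and smi[j] != ']':
--                 j += 1
--             if j < n and smi[j] == ']':
--                 j += 1
--             tokens.append(smi[i:j])
--             i = j
--         else:
--             tokens.append(smi[i])
--             i += 1
--     return ['^'] + tokens + ['$']
-- ===== Notes on version B (the rewrite author's own statement) =====
-- stated objective: alternative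
-- what changed: Replaced A's character-by-character state machine with a current_group accumulator by an index-based scanner that, on a bracket opener, looks ahead to the end of the bracket group and emits the slice in one step.
import Mathlib
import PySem

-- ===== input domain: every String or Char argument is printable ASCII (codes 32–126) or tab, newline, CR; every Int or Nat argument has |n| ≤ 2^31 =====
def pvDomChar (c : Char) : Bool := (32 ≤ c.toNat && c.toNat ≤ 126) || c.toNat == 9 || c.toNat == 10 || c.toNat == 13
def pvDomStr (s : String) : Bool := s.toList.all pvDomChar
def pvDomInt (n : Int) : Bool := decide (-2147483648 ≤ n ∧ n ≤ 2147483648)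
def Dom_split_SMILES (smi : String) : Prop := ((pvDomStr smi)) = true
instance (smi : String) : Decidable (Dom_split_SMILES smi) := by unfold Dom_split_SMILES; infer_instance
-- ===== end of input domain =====

-- B replaces A's running current_group state machine by an index/lookahead scanner that emits each
-- bracket group as one slice; same output, no speed claim (objective: alternative).

-- ===== PORT A =====
-- A's for-loop, step for step: state = (symbols, current_group).
def splitSMILESLoop (symbols : List String) (currentGroup : List Char) : List Char → List String
  | [] => if currentGroup ≠ [] then symbols ++ [String.ofList currentGroup] else symbols
  | c :: rest =>
    if c = '[' then
      splitSMILESLoop (if currentGroup ≠ [] then symbols ++ [String.ofList currentGroup] else symbols) [c] rest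
    else if c = ']' then
      splitSMILESLoop (symbols ++ [String.ofList (currentGroup ++ [c])]) [] rest
    else
      if currentGroup ≠ [] then splitSMILESLoop symbols (currentGroup ++ [c]) rest
      else splitSMILESLoop (symbols ++ [String.ofList [c]]) currentGroup rest

def split_SMILES (smi : String) : List String :=
  "^" :: splitSMILESLoop [] [] smi.toList ++ ["$"]

-- ===== PORT B =====
-- B's scanner: on a bracket opener, the inner while-loop is the takeWhile/dropWhile lookahead, the appended
-- slice smi[i:j] is the group built from the scanned characters; otherwise emit one character.
def splitSMILESScan : List Char → List String
  | [] => []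
  | c :: rest =>
    if c = '[' then
      let body := rest.takeWhile (fun x => x != '[' && x != ']')
      let tail := rest.dropWhile (fun x => x != '[' && x != ']')
      if tail.head? = some ']' then String.ofList ('[' :: body ++ [']']) :: splitSMILESScan tail.tail
      else String.ofList ('[' :: body) :: splitSMILESScan tail
    else String.ofList [c] :: splitSMILESScan rest
termination_by cs => cs.length
decreasing_by
  all_goals
    have h := List.length_dropWhile_le (p := fun x => x != '[' && x != ']') (l := rest)
    simp only [List.length_cons, List.length_tail]
    omega

def split_SMILES_alt (smi : String) : List String :=
  "^" :: splitSMILESScan smi.toList ++ ["$"]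

-- ===== PRECONDITION & SPEC =====
def Spec_split_SMILES (smi : String) (out : List String) : Prop := out = split_SMILES_alt smi
instance (smi : String) (out : List String) : Decidable (Spec_split_SMILES smi out) := by unfold Spec_split_SMILES; infer_instance

-- ===== CLAIM (what is proved, stated in full; the proofs are below) =====
def Claim_equal_split_SMILES : Prop := ∀ (smi : String), Dom_split_SMILES smi → Spec_split_SMILES smi (split_SMILES smi)

-- ===== LEMMAS AND PROOFS =====

-- what B's scanner produces while inside a bracket group opened earlier, with `body` already read
def grpRes (body cs : List Char) : List String :=
  let t := cs.takeWhile (fun x => x != '[' && x != ']')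
  let d := cs.dropWhile (fun x => x != '[' && x != ']')
  if d.head? = some ']' then String.ofList ('[' :: body ++ t ++ [']']) :: splitSMILESScan d.tail
  else String.ofList ('[' :: body ++ t) :: splitSMILESScan d

theorem scan_bracket (rest : List Char) : splitSMILESScan ('[' :: rest) = grpRes [] rest := by
  rw [splitSMILESScan, grpRes]
  simp

theorem main_lemma (cs : List Char) :
    (∀ syms, splitSMILESLoop syms [] cs = syms ++ splitSMILESScan cs) ∧
    (∀ syms body, splitSMILESLoop syms ('[' :: body) cs = syms ++ grpRes body cs) := by
  induction cs with
  | nil => constructor <;> intros <;> simp [splitSMILESLoop, splitSMILESScan, grpRes]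
  | cons c rest ih =>
    obtain ⟨ih1, ih2⟩ := ih
    constructor
    · intro syms
      by_cases hb : c = '['
      · subst hb
        rw [splitSMILESLoop, scan_bracket]
        simp [ih2]
      · by_cases hc : c = ']'
        · subst hc
          rw [splitSMILESLoop]
          simp [splitSMILESScan, ih1]
        · rw [splitSMILESLoop]
          simp [hb, hc, splitSMILESScan, ih1]
    · intro syms body
      by_cases hb : c = '['
      · subst hb
        rw [splitSMILESLoop, grpRes]
        simp [ih2, scan_bracket]
      · by_cases hc : c = ']'
        · subst hc
          rw [splitSMILESLoop, grpRes]
          simp [ih1]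
        · rw [splitSMILESLoop, grpRes]
          simp only [List.dropWhile_cons, List.takeWhile_cons]
          have hpc : ((c != '[') && (c != ']')) = true := by simp [hb, hc]
          rw [hpc]
          have := ih2 syms (body ++ [c])
          rw [grpRes] at this
          simp_all [List.append_assoc]

-- ===== VERDICT (by name: the statement is the Claim_ definition above) =====
theorem split_SMILES_spec : Claim_equal_split_SMILES := by
  intro smi _
  unfold Spec_split_SMILES split_SMILES split_SMILES_alt
  rw [(main_lemma smi.toList).1 []]
  simp
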